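-- pv_equiv track=rewrite | github.com/JARVVVIS/mt-sec-code | utils/diff_applier.py | process_unfenced_diff
-- ===== SOURCE A (Python) =====
-- def process_unfenced_diff(lines, start_line_num):
--     """
--     Process a diff that's not in a fenced block.
--
--     Args:
--         lines (list): The lines of the diff
--         start_line_num (int): The line number to start processing from
--
--     Returns:
--         tuple: (next_line_num, edits)
--     """
--     # Find the end of the diff
--     end_line_num = start_line_num
--     while end_line_num < len(lines):
--         if (
--             end_line_num + 1 < len(lines)
--             and lines[end_line_num].startswith("--- ")
--             and lines[end_line_num + 1].startswith("+++ ")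
--         ):
--             # Found the start of another diff
--             if end_line_num > start_line_num:
--                 break
--         end_line_num += 1
--
--     # Extract the file path
--     fname = None
--     if lines[start_line_num].startswith("--- ") and lines[
--         start_line_num + 1
--     ].startswith("+++ "):
--         fname = lines[start_line_num + 1][4:].strip()
--         start_line_num += 2
--
--     # Extract the hunks
--     edits = []
--     hunk = []
--     keeper = False
--
--     for line_num in range(start_line_num, end_line_num):
--         line = lines[line_num]
--         hunk.append(line)
--
--         if len(line) < 2:
--             continue
--
--         op = line[0]
--         if op in "-+":
--             keeper = True
--             continue
--         if op != "@":
--             continue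
--         if not keeper:
--             hunk = []
--             continue
--
--         hunk = hunk[:-1]
--         edits.append((fname, hunk))
--         hunk = []
--         keeper = False
--
--     # Add the last hunk if it's not empty
--     if hunk and keeper:
--         edits.append((fname, hunk))
--
--     return end_line_num, edits
-- ===== SOURCE B (Python) =====
-- def process_unfenced_diff(lines, start_line_num):
--     """Staged re-implementation: find the diff end by a find-first search over
--     candidate boundaries, then group the body into segments split on '@'
--     lines, then emit segments that contain a +/- line."""
--     n = len(lines)
--     # End of the diff: first boundary strictly after start_line_num, else n.
--     end_line_num = next(
--         (e for e in range(start_line_num + 1, n)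
--          if e + 1 < n
--          and lines[e].startswith("--- ")
--          and lines[e + 1].startswith("+++ ")),
--         n,
--     )
--
--     # File path from the header pair, if present.
--     fname = None
--     if lines[start_line_num].startswith("--- ") and lines[
--         start_line_num + 1
--     ].startswith("+++ "):
--         fname = lines[start_line_num + 1][4:].strip()
--         start_line_num += 2
--
--     # Group the body into segments, splitting on delimiter lines
--     # (length >= 2 and first char '@'); the delimiter itself is dropped.
--     segments = []
--     seg = []
--     i = start_line_num
--     while i < end_line_num:
--         line = lines[i]
--         if len(line) >= 2 and line[0] == "@":
--             segments.append(seg)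
--             seg = []
--         else:
--             seg.append(line)
--         i += 1
--     segments.append(seg)
--
--     # Keep exactly the segments containing at least one +/- line.
--     edits = [
--         (fname, s)
--         for s in segments
--         if any(len(l) >= 2 and l[0] in "-+" for l in s)
--     ]
--     return end_line_num, edits
-- ===== Notes on version B (the rewrite author's own statement) =====
-- stated objective: alternative
-- what changed: A's single stateful keeper-loop (and while-scan for the boundary) is replaced by staged passes: a find-first search for the next '---/+++' boundary, then a grouping pass splitting the body into segments on '@'-delimiter lines, then a filter keeping the segments that contain a +/- line.
-- outside the precondition, e.g. on process_unfenced_diff([], 0): A raises IndexError, B raises IndexError; on process_unfenced_diff(['--- a'], 0): A raises IndexError, B raises IndexError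
import Mathlib
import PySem

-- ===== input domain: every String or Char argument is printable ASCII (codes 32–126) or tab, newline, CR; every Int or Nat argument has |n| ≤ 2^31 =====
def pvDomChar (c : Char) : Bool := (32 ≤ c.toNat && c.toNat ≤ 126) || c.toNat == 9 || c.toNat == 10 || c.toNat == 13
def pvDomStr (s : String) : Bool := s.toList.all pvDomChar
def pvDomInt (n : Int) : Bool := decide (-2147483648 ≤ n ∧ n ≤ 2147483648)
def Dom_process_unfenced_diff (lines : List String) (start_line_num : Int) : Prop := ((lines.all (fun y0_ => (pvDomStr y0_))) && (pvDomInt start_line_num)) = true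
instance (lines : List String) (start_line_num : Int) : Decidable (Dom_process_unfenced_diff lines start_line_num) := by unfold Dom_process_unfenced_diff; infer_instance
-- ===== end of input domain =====

-- B replaces A's single stateful keeper-loop by staged passes (find-first boundary
-- search, group the body into '@'-delimited segments, filter segments with a +/- line);
-- same cost, objective: alternative decomposition.

-- ===== PORT A =====

-- lines[i] (Python indexing; Pre_ guarantees the index is in range wherever it is used)
def pvLine (lines : List String) (i : Int) : String := (PySem.List.pyGet? lines i).getD ""

-- A's while-loop finding the end of the diff (fuel = a structural totality guard,
-- always called with enough fuel for the loop to finish on its own)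
def pvFindEndA (lines : List String) (start : Int) : Nat → Int → Int
  | 0, e => e
  | fuel + 1, e =>
    if e < (lines.length : Int) then
      if e + 1 < (lines.length : Int) ∧
          PySem.Str.startswith (pvLine lines e) "--- " = true ∧
          PySem.Str.startswith (pvLine lines (e + 1)) "+++ " = true then
        if start < e then e else pvFindEndA lines start fuel (e + 1)
      else pvFindEndA lines start fuel (e + 1)
    else e

-- A's loop body: state (edits, hunk, keeper)
def pvStepA (lines : List String) (fname : Option String)
    (st : List (Option String × List String) × List String × Bool) (i : Int) :
    List (Option String × List String) × List String × Bool :=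
  let line := pvLine lines i
  let hunk := st.2.1 ++ [line]
  if PySem.Str.len line < 2 then (st.1, hunk, st.2.2)
  else
    let op := (PySem.Str.pyGet? line 0).getD ' '
    if op = '-' ∨ op = '+' then (st.1, hunk, true)
    else if op ≠ '@' then (st.1, hunk, st.2.2)
    else if st.2.2 = false then (st.1, ([] : List String), st.2.2)
    else (st.1 ++ [(fname, PySem.List.slice hunk none (some (-1)))], ([] : List String), false)

def process_unfenced_diff (lines : List String) (start_line_num : Int) :
    Int × (List (Option String × List String)) :=
  let end_line_num := pvFindEndA lines start_line_num
    (((lines.length : Int) - start_line_num).toNat + 1) start_line_num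
  let header :=
    if PySem.Str.startswith (pvLine lines start_line_num) "--- " = true ∧
       PySem.Str.startswith (pvLine lines (start_line_num + 1)) "+++ " = true then
      (some (PySem.Str.strip (PySem.Str.slice (pvLine lines (start_line_num + 1)) (some 4) none)),
       start_line_num + 2)
    else ((none : Option String), start_line_num)
  let st := (PySem.List.pyRange header.2 end_line_num 1).foldl (pvStepA lines header.1)
    ([], [], false)
  (end_line_num, st.1 ++ (if st.2.1 ≠ [] ∧ st.2.2 = true then [(header.1, st.2.1)] else []))

-- ===== PORT B =====

-- B's boundary predicate: e is the start of another '---'/'+++' header pair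
def pvBoundary (lines : List String) (e : Int) : Bool :=
  decide (e + 1 < (lines.length : Int) ∧
    PySem.Str.startswith (pvLine lines e) "--- " = true ∧
    PySem.Str.startswith (pvLine lines (e + 1)) "+++ " = true)

-- next((e for e in range(start+1, n) if boundary(e)), n)
def pvEndB (lines : List String) (start : Int) : Int :=
  ((PySem.List.pyRange (start + 1) (lines.length : Int) 1).find? (pvBoundary lines)).getD
    (lines.length : Int)

-- B's grouping while-loop: split the body on delimiter lines (len >= 2, first char '@')
-- (fuel = a structural totality guard, called with exactly the loop's iteration count)
def pvGroupB (lines : List String) (endn : Int) :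
    Nat → List (List String) → List String → Int → List (List String)
  | 0, segs, seg, _ => segs ++ [seg]
  | fuel + 1, segs, seg, i =>
    if i < endn then
      if 2 ≤ PySem.Str.len (pvLine lines i) ∧ (PySem.Str.pyGet? (pvLine lines i) 0).getD ' ' = '@' then
        pvGroupB lines endn fuel (segs ++ [seg]) [] (i + 1)
      else pvGroupB lines endn fuel segs (seg ++ [pvLine lines i]) (i + 1)
    else segs ++ [seg]

-- a +/- line (len >= 2 and first char in "-+"); a segment is kept iff it contains one
def pvKeepLine (l : String) : Bool :=
  decide (2 ≤ PySem.Str.len l ∧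
    ((PySem.Str.pyGet? l 0).getD ' ' = '-' ∨ (PySem.Str.pyGet? l 0).getD ' ' = '+'))

def pvKeepSeg (seg : List String) : Bool := seg.any pvKeepLine

def process_unfenced_diff_alt (lines : List String) (start_line_num : Int) :
    Int × (List (Option String × List String)) :=
  let end_line_num := pvEndB lines start_line_num
  let header :=
    if PySem.Str.startswith (pvLine lines start_line_num) "--- " = true ∧
       PySem.Str.startswith (pvLine lines (start_line_num + 1)) "+++ " = true then
      (some (PySem.Str.strip (PySem.Str.slice (pvLine lines (start_line_num + 1)) (some 4) none)),
       start_line_num + 2)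
    else ((none : Option String), start_line_num)
  (end_line_num,
    ((pvGroupB lines end_line_num ((end_line_num - header.2).toNat) [] [] header.2).filter
        pvKeepSeg).map
      (fun seg => (header.1, seg)))

-- ===== PRECONDITION & SPEC =====
-- Pre_ excludes exactly the inputs on which Python A raises IndexError:
-- start_line_num out of range for lines[start_line_num], or lines[start_line_num]
-- starts with "--- " while start_line_num + 1 is out of range.
def Pre_process_unfenced_diff (lines : List String) (start_line_num : Int) : Prop :=
  PySem.Raise.InRange lines.length start_line_num ∧
  (PySem.Str.startswith ((PySem.List.pyGet? lines start_line_num).getD "") "--- " = true →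
    PySem.Raise.InRange lines.length (start_line_num + 1))
instance (lines : List String) (start_line_num : Int) :
    Decidable (Pre_process_unfenced_diff lines start_line_num) := by
  unfold Pre_process_unfenced_diff; infer_instance

def pvWitness_process_unfenced_diff : List String × Int :=
  (["--- a.py", "+++ b.py", "@@ -1 +1 @@", "+x", " y"], 0)

def Spec_process_unfenced_diff (lines : List String) (start_line_num : Int) (out : Int × (List (Option String × List String))) : Prop := out = process_unfenced_diff_alt lines start_line_num
instance (lines : List String) (start_line_num : Int) (out : Int × (List (Option String × List String))) : Decidable (Spec_process_unfenced_diff lines start_line_num out) := by unfold Spec_process_unfenced_diff; infer_instance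

-- ===== CLAIM (what is proved, stated in full; the proofs are below) =====
def Claim_equal_process_unfenced_diff : Prop := ∀ (lines : List String) (start_line_num : Int), Dom_process_unfenced_diff lines start_line_num → Pre_process_unfenced_diff lines start_line_num → Spec_process_unfenced_diff lines start_line_num (process_unfenced_diff lines start_line_num)

-- ===== LEMMAS AND PROOFS =====

-- pvGroupB unfolding equations
theorem pvGroupB_zero (lines : List String) (endn : Int) (segs : List (List String))
    (seg : List String) (i : Int) :
    pvGroupB lines endn 0 segs seg i = segs ++ [seg] := rfl

theorem pvGroupB_succ (lines : List String) (endn : Int) (fuel : Nat)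
    (segs : List (List String)) (seg : List String) (i : Int) :
    pvGroupB lines endn (fuel + 1) segs seg i =
      if i < endn then
        if 2 ≤ PySem.Str.len (pvLine lines i) ∧
            (PySem.Str.pyGet? (pvLine lines i) 0).getD ' ' = '@' then
          pvGroupB lines endn fuel (segs ++ [seg]) [] (i + 1)
        else pvGroupB lines endn fuel segs (seg ++ [pvLine lines i]) (i + 1)
      else segs ++ [seg] := rfl

-- A's boundary scan, past the start, is a find-first search
theorem pvFindEndA_find (lines : List String) (s : Int) :
    ∀ (fuel : Nat) (e : Int), s < e → e ≤ (lines.length : Int) →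
      ((lines.length : Int) - e).toNat < fuel →
      pvFindEndA lines s fuel e =
        ((PySem.List.pyRange e (lines.length : Int) 1).find? (pvBoundary lines)).getD
          (lines.length : Int) := by
  intro fuel
  induction fuel with
  | zero => intro e _ _ he; omega
  | succ fuel ih =>
    intro e hse hle he
    show (if e < (lines.length : Int) then _ else e) = _
    by_cases hlt : e < (lines.length : Int)
    · rw [if_pos hlt, PySem.List.pyRange_one_cons hlt, List.find?_cons]
      by_cases hb : e + 1 < (lines.length : Int) ∧
          PySem.Str.startswith (pvLine lines e) "--- " = true ∧
          PySem.Str.startswith (pvLine lines (e + 1)) "+++ " = true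
      · have hbt : pvBoundary lines e = true := decide_eq_true hb
        rw [if_pos hb, if_pos hse, hbt]
        rfl
      · have hbf : pvBoundary lines e = false := decide_eq_false hb
        rw [if_neg hb, hbf, ih (e + 1) (by omega) (by omega) (by omega)]
    · rw [if_neg hlt, PySem.List.pyRange_one_eq_nil (by omega)]
      simp only [List.find?_nil, Option.getD_none]
      omega

-- A's full boundary scan equals B's pvEndB (the break can only fire past the start)
theorem pvEnd_eq (lines : List String) (s : Int) (hs : s < (lines.length : Int)) :
    pvFindEndA lines s (((lines.length : Int) - s).toNat + 1) s = pvEndB lines s := by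
  have step : pvFindEndA lines s (((lines.length : Int) - s).toNat + 1) s =
      pvFindEndA lines s (((lines.length : Int) - s).toNat) (s + 1) := by
    show (if s < (lines.length : Int) then _ else s) = _
    rw [if_pos hs]
    by_cases hb : s + 1 < (lines.length : Int) ∧
        PySem.Str.startswith (pvLine lines s) "--- " = true ∧
        PySem.Str.startswith (pvLine lines (s + 1)) "+++ " = true
    · rw [if_pos hb, if_neg (by omega)]
    · rw [if_neg hb]
  rw [step, pvFindEndA_find lines s (((lines.length : Int) - s).toNat) (s + 1)
        (by omega) (by omega) (by omega)]
  rfl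

-- pvGroupB: the already-closed segments are a passive prefix
theorem pvGroupB_closed (lines : List String) (endn : Int) :
    ∀ (fuel : Nat) (i : Int) (segs : List (List String)) (seg : List String),
      pvGroupB lines endn fuel segs seg i = segs ++ pvGroupB lines endn fuel [] seg i := by
  intro fuel
  induction fuel with
  | zero => intro i segs seg; simp [pvGroupB_zero]
  | succ fuel ih =>
    intro i segs seg
    rw [pvGroupB_succ, pvGroupB_succ]
    by_cases hlt : i < endn
    · rw [if_pos hlt, if_pos hlt]
      by_cases hd : 2 ≤ PySem.Str.len (pvLine lines i) ∧
          (PySem.Str.pyGet? (pvLine lines i) 0).getD ' ' = '@'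
      · rw [if_pos hd, if_pos hd]
        simp only [List.nil_append]
        rw [ih (i + 1) (segs ++ [seg]) [], ih (i + 1) [seg] []]
        simp
      · rw [if_neg hd, if_neg hd, ih (i + 1) segs (seg ++ [pvLine lines i]),
            ih (i + 1) [] (seg ++ [pvLine lines i])]
    · rw [if_neg hlt, if_neg hlt]
      simp

-- main invariant: A's stateful loop equals B's group-then-filter
theorem pv_main (lines : List String) (fname : Option String) (endn : Int) :
    ∀ (fuel : Nat) (i : Int), (endn - i).toNat ≤ fuel →
      ∀ (edits : List (Option String × List String)) (hunk : List String),
      (fun st : List (Option String × List String) × List String × Bool =>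
        st.1 ++ (if st.2.1 ≠ [] ∧ st.2.2 = true then [(fname, st.2.1)] else []))
        ((PySem.List.pyRange i endn 1).foldl (pvStepA lines fname)
          (edits, hunk, hunk.any pvKeepLine))
      = edits ++
        (((pvGroupB lines endn fuel [] hunk i).filter pvKeepSeg).map
          (fun seg => (fname, seg))) := by
  intro fuel
  induction fuel with
  | zero =>
    intro i hi edits hunk
    have hlt : ¬ i < endn := by omega
    rw [PySem.List.pyRange_one_eq_nil (by omega), pvGroupB_zero]
    by_cases hk : hunk.any pvKeepLine = true
    · have hne : hunk ≠ [] := by intro h; subst h; simp at hk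
      simp [pvKeepSeg, hk, hne]
    · have hkf : hunk.any pvKeepLine = false := by simpa using hk
      simp [pvKeepSeg, hkf]
  | succ fuel ih =>
    intro i hi edits hunk
    rw [pvGroupB_succ]
    by_cases hlt : i < endn
    · rw [PySem.List.pyRange_one_cons hlt, List.foldl_cons, if_pos hlt]
      set line := pvLine lines i with hline
      by_cases hd : 2 ≤ PySem.Str.len line ∧ (PySem.Str.pyGet? line 0).getD ' ' = '@'
      · -- delimiter line
        have hnotlt : ¬ PySem.Str.len line < 2 := by omega
        rw [if_pos hd]
        simp only [List.nil_append]
        rw [pvGroupB_closed lines endn fuel (i + 1) [hunk] []]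
        by_cases hk : hunk.any pvKeepLine = true
        · -- keeper: A emits the hunk (without the '@' line); B closes a kept segment
          have hA : pvStepA lines fname (edits, hunk, hunk.any pvKeepLine) i =
              (edits ++ [(fname, hunk)], ([] : List String), false) := by
            simp only [pvStepA, ← hline]
            rw [if_neg hnotlt,
              if_neg (show ¬((PySem.Str.pyGet? line 0).getD ' ' = '-' ∨
                  (PySem.Str.pyGet? line 0).getD ' ' = '+') by
                rintro (h | h) <;> rw [hd.2] at h <;> simp at h),
              if_neg (show ¬(PySem.Str.pyGet? line 0).getD ' ' ≠ '@' from fun h => h hd.2),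
              if_neg (show ¬(hunk.any pvKeepLine = false) by simp [hk]),
              PySem.List.slice_to_neg_one]
            simp
          rw [hA]
          have := ih (i + 1) (by omega) (edits ++ [(fname, hunk)]) []
          simp only [List.any_nil] at this
          rw [this]
          simp [pvKeepSeg, hk]
        · -- no keeper yet: A drops the hunk; B closes a dropped segment
          have hkf : hunk.any pvKeepLine = false := by simpa using hk
          have hA : pvStepA lines fname (edits, hunk, hunk.any pvKeepLine) i =
              (edits, ([] : List String), hunk.any pvKeepLine) := by
            simp only [pvStepA, ← hline]
            rw [if_neg hnotlt,
              if_neg (show ¬((PySem.Str.pyGet? line 0).getD ' ' = '-' ∨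
                  (PySem.Str.pyGet? line 0).getD ' ' = '+') by
                rintro (h | h) <;> rw [hd.2] at h <;> simp at h),
              if_neg (show ¬(PySem.Str.pyGet? line 0).getD ' ' ≠ '@' from fun h => h hd.2),
              if_pos hkf]
          rw [hA, hkf]
          have := ih (i + 1) (by omega) edits []
          simp only [List.any_nil] at this
          rw [this]
          simp [pvKeepSeg, hkf]
      · -- not a delimiter: both sides just append the line to the open hunk/segment
        rw [if_neg hd]
        have hA : pvStepA lines fname (edits, hunk, hunk.any pvKeepLine) i =
            (edits, hunk ++ [line], (hunk ++ [line]).any pvKeepLine) := by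
          by_cases hlen : PySem.Str.len line < 2
          · have hnk : pvKeepLine line = false := by
              simp only [pvKeepLine, decide_eq_false_iff_not]
              rintro ⟨h, -⟩; omega
            simp only [pvStepA, ← hline]
            rw [if_pos hlen]
            simp [List.any_append, hnk]
          · have hna : ¬ (PySem.Str.pyGet? line 0).getD ' ' = '@' := fun h => hd ⟨by omega, h⟩
            by_cases hop : (PySem.Str.pyGet? line 0).getD ' ' = '-' ∨
                (PySem.Str.pyGet? line 0).getD ' ' = '+'
            · have hkl : pvKeepLine line = true := by
                simp only [pvKeepLine, decide_eq_true_eq]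
                exact ⟨by omega, hop⟩
              simp only [pvStepA, ← hline]
              rw [if_neg hlen, if_pos hop]
              simp [List.any_append, hkl]
            · have hnk : pvKeepLine line = false := by
                simp only [pvKeepLine, decide_eq_false_iff_not]
                rintro ⟨-, h⟩; exact hop h
              simp only [pvStepA, ← hline]
              rw [if_neg hlen, if_neg hop, if_pos hna]
              simp [List.any_append, hnk]
        rw [hA]
        exact ih (i + 1) (by omega) edits (hunk ++ [line])
    · rw [PySem.List.pyRange_one_eq_nil (by omega), if_neg hlt]
      by_cases hk : hunk.any pvKeepLine = true
      · have hne : hunk ≠ [] := by intro h; subst h; simp at hk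
        simp [pvKeepSeg, hk, hne]
      · have hkf : hunk.any pvKeepLine = false := by simpa using hk
        simp [pvKeepSeg, hkf]

-- ===== VERDICT (by name: the statement is the Claim_ definition above) =====
theorem process_unfenced_diff_spec : Claim_equal_process_unfenced_diff := by
  intro lines start_line_num _dom pre
  have hs : start_line_num < (lines.length : Int) := by
    have := pre.1
    simp only [PySem.Raise.InRange] at this
    omega
  unfold Spec_process_unfenced_diff process_unfenced_diff process_unfenced_diff_alt
  rw [pvEnd_eq lines start_line_num hs]
  have := pv_main lines
    (if PySem.Str.startswith (pvLine lines start_line_num) "--- " = true ∧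
        PySem.Str.startswith (pvLine lines (start_line_num + 1)) "+++ " = true then
       (some (PySem.Str.strip (PySem.Str.slice (pvLine lines (start_line_num + 1)) (some 4) none)),
        start_line_num + 2)
     else ((none : Option String), start_line_num)).1
    (pvEndB lines start_line_num)
    ((pvEndB lines start_line_num -
      (if PySem.Str.startswith (pvLine lines start_line_num) "--- " = true ∧
          PySem.Str.startswith (pvLine lines (start_line_num + 1)) "+++ " = true then
         (some (PySem.Str.strip (PySem.Str.slice (pvLine lines (start_line_num + 1)) (some 4) none)),
          start_line_num + 2)
       else ((none : Option String), start_line_num)).2).toNat)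
    (if PySem.Str.startswith (pvLine lines start_line_num) "--- " = true ∧
        PySem.Str.startswith (pvLine lines (start_line_num + 1)) "+++ " = true then
       (some (PySem.Str.strip (PySem.Str.slice (pvLine lines (start_line_num + 1)) (some 4) none)),
        start_line_num + 2)
     else ((none : Option String), start_line_num)).2
    le_rfl [] []
  simp only [List.any_nil] at this
  exact congrArg (Prod.mk (pvEndB lines start_line_num)) (by simpa using this)
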